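-- pv_equiv track=rewrite | github.com/MrBrantCode/unitest_baseline | mut_generate/mist_train_cf/cf_46973/solution.py | peopleIndices
-- ===== SOURCE A (Python) =====
-- def peopleIndices(favoriteCompanies, char):
--     n = len(favoriteCompanies)
--     favSets = [set(fav) for fav in favoriteCompanies]
--     result = []
--     for i in range(n):
--         if any(favSets[i] < favSets[j] for j in range(n) if j != i):
--             continue
--         if any(char in company for company in favoriteCompanies[i]):
--             result.append(i)
--     return result
-- ===== SOURCE B (Python) =====
-- def peopleIndices(favoriteCompanies, char):
--     favSets = [set(fav) for fav in favoriteCompanies]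
--     # process people in order of decreasing favourite-set size: a proper superset
--     # can only come from a strictly larger set, which was processed earlier
--     order = sorted(range(len(favoriteCompanies)), key=lambda i: -len(favSets[i]))
--     kept = []
--     seen = []
--     for i in order:
--         if not any(len(favSets[j]) > len(favSets[i]) and favSets[i] <= favSets[j]
--                    for j in seen):
--             if any(char in company for company in favoriteCompanies[i]):
--                 kept.append(i)
--         seen.append(i)
--     return sorted(kept)
-- ===== Notes on version B (the rewrite author's own statement) =====
-- stated objective: alternative
-- what changed: Replaces the all-pairs proper-subset test with a size-descending sorted sweep: people are processed in order of decreasing favourite-set size, and each person is checked for domination only against the already-processed (strictly larger) sets, restoring ascending index order at the end.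
import Mathlib
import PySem

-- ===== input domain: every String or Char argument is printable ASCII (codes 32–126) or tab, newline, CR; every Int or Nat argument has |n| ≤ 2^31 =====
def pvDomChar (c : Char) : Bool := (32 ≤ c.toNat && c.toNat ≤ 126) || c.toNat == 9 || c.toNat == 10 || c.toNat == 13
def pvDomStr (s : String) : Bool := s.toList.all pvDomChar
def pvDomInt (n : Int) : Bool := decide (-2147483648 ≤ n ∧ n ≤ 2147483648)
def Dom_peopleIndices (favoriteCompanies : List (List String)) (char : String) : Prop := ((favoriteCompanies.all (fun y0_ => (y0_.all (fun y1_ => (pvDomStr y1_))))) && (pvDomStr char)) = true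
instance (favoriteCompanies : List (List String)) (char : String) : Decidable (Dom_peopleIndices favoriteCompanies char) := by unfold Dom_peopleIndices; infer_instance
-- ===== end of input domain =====

-- B processes people by decreasing favourite-set size (a proper superset is strictly larger,
-- hence already seen), instead of A's all-pairs proper-subset test; objective: alternative.

-- ===== PORT A =====
def peopleIndices (favoriteCompanies : List (List String)) (char : String) : List Int :=
  let n : Int := favoriteCompanies.length
  let favSets : List (PySem.Set String) := favoriteCompanies.map (fun fav => PySem.Set.ofList fav)
  (PySem.List.pyRange 0 n 1).foldl (fun result i =>
    if ((PySem.List.pyRange 0 n 1).filter (fun j => j != i)).any (fun j =>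
          -- favSets[i] < favSets[j] : proper subset = (s <= t and not t <= s)
          (PySem.List.pyGetD favSets i []).issubset (PySem.List.pyGetD favSets j []) &&
          !((PySem.List.pyGetD favSets j []).issubset (PySem.List.pyGetD favSets i [])))
    then result
    else if (PySem.List.pyGetD favoriteCompanies i []).any (fun company => PySem.Str.isIn char company)
    then result ++ [i]
    else result) []

-- ===== PORT B =====
def peopleIndices_alt (favoriteCompanies : List (List String)) (char : String) : List Int :=
  let favSets : List (PySem.Set String) := favoriteCompanies.map (fun fav => PySem.Set.ofList fav)
  -- indexing favSets[i] is always in range here; pyGetD is exact on that domain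
  let order := PySem.List.sorted (PySem.List.pyRange 0 (favoriteCompanies.length : Int) 1)
      (fun i => -(PySem.List.pyGetD favSets i []).len) false
  let st := order.foldl (fun (st : List Int × List Int) i =>
      (if !(st.2.any (fun j =>
              decide ((PySem.List.pyGetD favSets j []).len > (PySem.List.pyGetD favSets i []).len) &&
              (PySem.List.pyGetD favSets i []).issubset (PySem.List.pyGetD favSets j [])))
       then (if (PySem.List.pyGetD favoriteCompanies i []).any (fun company => PySem.Str.isIn char company)
             then st.1 ++ [i] else st.1)
       else st.1,
       st.2 ++ [i])) ([], [])
  PySem.List.sorted st.1 (fun x => x) false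

-- ===== PRECONDITION & SPEC =====
def Spec_peopleIndices (favoriteCompanies : List (List String)) (char : String) (out : List Int) : Prop := out = peopleIndices_alt favoriteCompanies char
instance (favoriteCompanies : List (List String)) (char : String) (out : List Int) : Decidable (Spec_peopleIndices favoriteCompanies char out) := by unfold Spec_peopleIndices; infer_instance

-- ===== CLAIM (what is proved, stated in full; the proofs are below) =====
def Claim_equal_peopleIndices : Prop := ∀ (favoriteCompanies : List (List String)) (char : String), Dom_peopleIndices favoriteCompanies char → Spec_peopleIndices favoriteCompanies char (peopleIndices favoriteCompanies char)

-- ===== LEMMAS AND PROOFS =====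

-- favSets[i] as a named function (definitionally the term both ports use)
def gS (fc : List (List String)) (i : Int) : PySem.Set String :=
  PySem.List.pyGetD (fc.map (fun fav => PySem.Set.ofList fav)) i []

-- A's domination test for person i (definitionally A's inner any)
def condA (fc : List (List String)) (i : Int) : Bool :=
  ((PySem.List.pyRange 0 (fc.length : Int) 1).filter (fun j => j != i)).any (fun j =>
    (gS fc i).issubset (gS fc j) && !((gS fc j).issubset (gS fc i)))

-- the character test (identical in both ports)
def condH (fc : List (List String)) (char : String) (i : Int) : Bool :=
  (PySem.List.pyGetD fc i []).any (fun company => PySem.Str.isIn char company)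

-- the per-person keep predicate both programs compute
def pQ (fc : List (List String)) (char : String) (i : Int) : Bool :=
  !condA fc i && condH fc char i

-- B's test of i against an already-seen j
def bigP (fc : List (List String)) (i j : Int) : Bool :=
  decide ((gS fc j).len > (gS fc i).len) && (gS fc i).issubset (gS fc j)

-- B's processing order (definitionally the `order` of port B)
def orderL (fc : List (List String)) : List Int :=
  PySem.List.sorted (PySem.List.pyRange 0 (fc.length : Int) 1)
    (fun i => -(gS fc i).len) false

-- B's loop body (definitionally port B's fold function)
def stepB (fc : List (List String)) (char : String) (st : List Int × List Int) (i : Int) :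
    List Int × List Int :=
  (if !(st.2.any (fun j => bigP fc i j))
   then (if condH fc char i then st.1 ++ [i] else st.1)
   else st.1,
   st.2 ++ [i])

lemma gS_nodup (fc : List (List String)) (i : Int) (h0 : 0 ≤ i) (h1 : i < (fc.length : Int)) :
    (gS fc i).Nodup := by
  unfold gS
  rw [PySem.List.pyGetD_eq_getElem _ _ h0 (by simpa using h1)]
  simp only [List.getElem_map]
  exact PySem.Set.nodup_ofList _

lemma len_lt_iff (s t : PySem.Set String) : s.len < t.len ↔ s.length < t.length := by
  simp [PySem.Set.len]

lemma strict_of_not_superset (s t : List String) (hs : s.Nodup) (ht : t.Nodup)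
    (hsub : s ⊆ t) (hns : ¬ t ⊆ s) : s.length < t.length := by
  classical
  have h1 : s.toFinset ⊆ t.toFinset := by
    intro x hx; exact List.mem_toFinset.mpr (hsub (List.mem_toFinset.mp hx))
  have h2 : ¬ t.toFinset ⊆ s.toFinset := by
    intro hh; exact hns (fun x hx => List.mem_toFinset.mp (hh (List.mem_toFinset.mpr hx)))
  have hcard := Finset.card_lt_card (Finset.ssubset_def.mpr ⟨h1, h2⟩)
  rwa [List.toFinset_card_of_nodup hs, List.toFinset_card_of_nodup ht] at hcard

lemma not_superset_of_lt (s t : List String) (ht : t.Nodup) (hlen : s.length < t.length) :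
    ¬ t ⊆ s := by
  intro hsub
  have h1 : t.toFinset ⊆ s.toFinset := fun x hx =>
    List.mem_toFinset.mpr (hsub (List.mem_toFinset.mp hx))
  have h2 := Finset.card_le_card h1
  rw [List.toFinset_card_of_nodup ht] at h2
  have h3 := List.toFinset_card_le s
  omega

lemma mem_orderL (fc : List (List String)) (j : Int) :
    j ∈ orderL fc ↔ 0 ≤ j ∧ j < (fc.length : Int) := by
  unfold orderL
  rw [(PySem.List.sorted_perm _ _ _).mem_iff]
  exact PySem.List.mem_pyRange_one

lemma condA_iff (fc : List (List String)) (i : Int) :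
    condA fc i = true ↔
      ∃ j : Int, (0 ≤ j ∧ j < (fc.length : Int)) ∧ j ≠ i ∧
        gS fc i ⊆ gS fc j ∧ ¬ gS fc j ⊆ gS fc i := by
  unfold condA
  rw [List.any_eq_true]
  constructor
  · rintro ⟨j, hjm, hj⟩
    rcases List.mem_filter.mp hjm with ⟨hjr, hne⟩
    rw [Bool.and_eq_true] at hj
    rcases hj with ⟨hsub, hnsub⟩
    refine ⟨j, PySem.List.mem_pyRange_one.mp hjr, bne_iff_ne.mp hne, ?_, ?_⟩
    · exact fun x hx => (PySem.Set.issubset_iff _ _).mp hsub x hx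
    · intro hts
      have : (gS fc j).issubset (gS fc i) = true :=
        (PySem.Set.issubset_iff _ _).mpr (fun x hx => hts hx)
      simp [this] at hnsub
  · rintro ⟨j, hjr, hne, hsub, hnsub⟩
    refine ⟨j, List.mem_filter.mpr ⟨PySem.List.mem_pyRange_one.mpr hjr, bne_iff_ne.mpr hne⟩, ?_⟩
    rw [Bool.and_eq_true]
    constructor
    · exact (PySem.Set.issubset_iff _ _).mpr (fun x hx => hsub hx)
    · cases hcase : (gS fc j).issubset (gS fc i) with
      | false => rfl
      | true => exact absurd (fun x hx => (PySem.Set.issubset_iff _ _).mp hcase x hx) hnsub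

-- heart of the equivalence: when i is processed with prefix `pre`, scanning `pre`
-- for a strictly larger superset is exactly A's global proper-superset test
lemma seen_eq (fc : List (List String)) (pre suf : List Int) (i : Int)
    (h : orderL fc = pre ++ i :: suf) :
    pre.any (fun j => bigP fc i j) = condA fc i := by
  have hi : i ∈ orderL fc := by rw [h]; simp
  obtain ⟨hi0, hin⟩ := (mem_orderL fc i).mp hi
  have hnodi := gS_nodup fc i hi0 hin
  rw [Bool.eq_iff_iff, condA_iff]
  constructor
  · intro hpre
    rcases List.any_eq_true.mp hpre with ⟨j, hjpre, hj⟩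
    unfold bigP at hj
    rw [Bool.and_eq_true] at hj
    rcases hj with ⟨hlt, hsub⟩
    have hlt' : (gS fc i).length < (gS fc j).length :=
      (len_lt_iff _ _).mp (of_decide_eq_true hlt)
    have hjmem : j ∈ orderL fc := by rw [h]; exact List.mem_append.mpr (Or.inl hjpre)
    obtain ⟨hj0, hjn⟩ := (mem_orderL fc j).mp hjmem
    have hsub' : gS fc i ⊆ gS fc j := fun x hx => (PySem.Set.issubset_iff _ _).mp hsub x hx
    refine ⟨j, ⟨hj0, hjn⟩, ?_, hsub', ?_⟩
    · intro hEq; rw [hEq] at hlt'; omega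
    · exact not_superset_of_lt _ _ (gS_nodup fc j hj0 hjn) hlt'
  · rintro ⟨j, ⟨hj0, hjn⟩, hne, hsub, hnsub⟩
    have hnodj := gS_nodup fc j hj0 hjn
    have hlt : (gS fc i).length < (gS fc j).length :=
      strict_of_not_superset _ _ hnodi hnodj hsub hnsub
    have hjmem : j ∈ orderL fc := (mem_orderL fc j).mpr ⟨hj0, hjn⟩
    have hjpre : j ∈ pre := by
      rw [h] at hjmem
      rcases List.mem_append.mp hjmem with hc | hc
      · exact hc
      · rcases List.mem_cons.mp hc with hc' | hc'
        · exact absurd hc' hne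
        · -- j after i in the size-descending order would have a no-larger set
          exfalso
          have hpw : (orderL fc).Pairwise
              (fun a b => (fun k => -(gS fc k).len) a ≤ (fun k => -(gS fc k).len) b) :=
            PySem.List.sorted_pairwise _ _
          rw [h] at hpw
          have h2 := (List.pairwise_append.mp hpw).2.1
          have h3 := (List.pairwise_cons.mp h2).1 j hc'
          simp only [neg_le_neg_iff] at h3
          have := (len_lt_iff (gS fc i) (gS fc j)).mpr hlt
          omega
    refine List.any_eq_true.mpr ⟨j, hjpre, ?_⟩
    unfold bigP
    rw [Bool.and_eq_true]
    refine ⟨?_, ?_⟩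
    · exact decide_eq_true ((len_lt_iff _ _).mpr hlt)
    · exact (PySem.Set.issubset_iff _ _).mpr (fun x hx => hsub hx)

-- B's sweep keeps exactly the persons satisfying pQ, in sweep order
lemma fold_inv (fc : List (List String)) (char : String) :
    ∀ (suf pre kept0 : List Int), orderL fc = pre ++ suf →
      List.foldl (stepB fc char) (kept0, pre) suf =
        (kept0 ++ suf.filter (pQ fc char), pre ++ suf) := by
  intro suf
  induction suf with
  | nil => intro pre kept0 _; simp
  | cons i suf ih =>
    intro pre kept0 h
    simp only [List.foldl_cons]
    have hstep : stepB fc char (kept0, pre) i =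
        (kept0 ++ (if pQ fc char i then [i] else []), pre ++ [i]) := by
      unfold stepB pQ
      rw [show (pre.any (fun j => bigP fc i j)) = condA fc i from seen_eq fc pre suf i h]
      cases hA : condA fc i <;> cases hH : condH fc char i <;> simp
    rw [hstep, ih (pre ++ [i]) _ (by simpa using h)]
    cases hq : pQ fc char i <;> simp [hq]

-- A is the ascending filter by pQ
lemma A_char (fc : List (List String)) (char : String) :
    peopleIndices fc char = (PySem.List.pyRange 0 (fc.length : Int) 1).filter (pQ fc char) := by
  have h0 : peopleIndices fc char =
      List.foldl (fun result i => if condA fc i then result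
        else if condH fc char i then result ++ [i] else result) []
        (PySem.List.pyRange 0 (fc.length : Int) 1) := rfl
  rw [h0,
    PySem.List.foldl_congr_mem _ _ (fun result i => if pQ fc char i then result ++ [i] else result) []
      (by intro acc x _; unfold pQ
          cases hA : condA fc x <;> cases hH : condH fc char x <;> simp [hA, hH])]
  simpa using PySem.List.foldl_append_if_eq_filter (pQ fc char) _ []

lemma range_filter_pairwise (fc : List (List String)) (char : String) :
    ((PySem.List.pyRange 0 (fc.length : Int) 1).filter (pQ fc char)).Pairwise
      (fun a b => (fun x => x) a < (fun x => x) b) := by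
  apply List.Pairwise.filter
  rw [PySem.List.pyRange_zero_natCast]
  rw [List.pairwise_map]
  exact (List.pairwise_lt_range).imp (fun hab => Int.ofNat_lt.mpr hab)

-- ===== VERDICT helper =====
theorem peopleIndices_eq_alt (fc : List (List String)) (char : String) :
    peopleIndices fc char = peopleIndices_alt fc char := by
  have hB : peopleIndices_alt fc char =
      PySem.List.sorted ((orderL fc).foldl (stepB fc char) ([], [])).1 (fun x => x) false := rfl
  have hfold := fold_inv fc char (orderL fc) [] [] (by simp)
  rw [A_char, hB, hfold]
  simp only [List.nil_append]
  refine (PySem.List.sorted_eq_of_perm_of_pairwise_lt _ _ _ ?_ ?_).symm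
  · exact ((PySem.List.sorted_perm _ _ _).filter _).symm
  · exact range_filter_pairwise fc char

-- ===== VERDICT (by name: the statement is the Claim_ definition above) =====
theorem peopleIndices_spec : Claim_equal_peopleIndices := by
  intro fc char _
  unfold Spec_peopleIndices
  exact peopleIndices_eq_alt fc char
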